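-- pv_equiv track=rewrite | github.com/team-orca/CodeFights | Challenges/quadZip.py | quadZip
-- ===== SOURCE A (Python) =====
-- def quadZip(q,w,e,r):
--     s=""
--     for x in range(0, 76):
--         if x < len(q):
--             s +=str(q[x])
--         if x < len(w):
--             s +=str(w[x])
--         if x < len(e):
--             s +=str(e[x])
--         if x < len(r):
--             s +=str(r[x])
--
--     return s
-- ===== SOURCE B (Python) =====
-- def quadZip(q, w, e, r):
--     qs, ws, es, rs = q[:76], w[:76], e[:76], r[:76]
--     out = []
--     while qs or ws or es or rs:
--         for s in (qs, ws, es, rs):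
--             if s:
--                 out.append(str(s[0]))
--         qs, ws, es, rs = qs[1:], ws[1:], es[1:], rs[1:]
--     return "".join(out)
-- ===== Notes on version B (the rewrite author's own statement) =====
-- stated objective: simpler
-- what changed: Replaces A's fixed 76-iteration index loop with four per-index bounds checks by slicing each input to its first 76 characters and consuming the four slices head-by-head until all are exhausted (a zip_longest-style column traversal).
import Mathlib
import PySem

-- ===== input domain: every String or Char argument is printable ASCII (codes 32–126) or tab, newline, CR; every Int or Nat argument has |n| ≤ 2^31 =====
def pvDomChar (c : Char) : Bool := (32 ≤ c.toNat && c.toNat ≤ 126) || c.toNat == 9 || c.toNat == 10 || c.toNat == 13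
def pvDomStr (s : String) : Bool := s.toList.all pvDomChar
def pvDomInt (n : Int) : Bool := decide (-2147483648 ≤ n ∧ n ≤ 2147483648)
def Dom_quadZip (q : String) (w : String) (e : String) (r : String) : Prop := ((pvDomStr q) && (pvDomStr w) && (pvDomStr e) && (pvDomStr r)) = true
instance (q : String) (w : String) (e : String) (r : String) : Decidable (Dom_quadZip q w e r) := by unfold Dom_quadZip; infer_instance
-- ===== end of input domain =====

-- B replaces A's 76-step index loop with four guarded lookups by slicing each input
-- to its first 76 characters and consuming the four slices head-by-head (simpler).

-- ===== PORT A =====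
-- one iteration of A's loop body: four guarded 'if x < len(·): s += str(·[x])' appends
def quadZipStep (ql wl el rl : List Char) (s : List Char) (x : Int) : List Char :=
  let s := if x < (ql.length : Int) then s ++ [PySem.List.pyGetD ql x ' '] else s
  let s := if x < (wl.length : Int) then s ++ [PySem.List.pyGetD wl x ' '] else s
  let s := if x < (el.length : Int) then s ++ [PySem.List.pyGetD el x ' '] else s
  if x < (rl.length : Int) then s ++ [PySem.List.pyGetD rl x ' '] else s

-- 's = ""; for x in range(0, 76): <body>; return s'  (string built as List Char, exact)
def quadZip (q : String) (w : String) (e : String) (r : String) : String :=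
  String.ofList ((PySem.List.pyRange 0 76 1).foldl
    (quadZipStep q.toList w.toList e.toList r.toList) [])

-- ===== PORT B =====
-- the while loop of Source B: emit the head (if any) of each of the four lists, then recurse on the tails
def quadZipMerge (a b c d : List Char) : List Char :=
  if _h : a = [] ∧ b = [] ∧ c = [] ∧ d = [] then []
  else (a.head?.toList ++ b.head?.toList ++ c.head?.toList ++ d.head?.toList)
       ++ quadZipMerge a.tail b.tail c.tail d.tail
termination_by a.length + b.length + c.length + d.length
decreasing_by
  rcases a with _ | ⟨x, a⟩ <;> rcases b with _ | ⟨y, b⟩ <;> rcases c with _ | ⟨z, c⟩ <;>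
    rcases d with _ | ⟨u, d⟩ <;> simp_all <;> omega

def quadZip_alt (q : String) (w : String) (e : String) (r : String) : String :=
  String.ofList (quadZipMerge
    (PySem.List.slice q.toList none (some 76))
    (PySem.List.slice w.toList none (some 76))
    (PySem.List.slice e.toList none (some 76))
    (PySem.List.slice r.toList none (some 76)))

-- ===== PRECONDITION & SPEC =====
def Spec_quadZip (q : String) (w : String) (e : String) (r : String) (out : String) : Prop := out = quadZip_alt q w e r
instance (q : String) (w : String) (e : String) (r : String) (out : String) : Decidable (Spec_quadZip q w e r out) := by unfold Spec_quadZip; infer_instance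

-- ===== CLAIM (what is proved, stated in full; the proofs are below) =====
def Claim_equal_quadZip : Prop := ∀ (q : String) (w : String) (e : String) (r : String), Dom_quadZip q w e r → Spec_quadZip q w e r (quadZip q w e r)

-- ===== LEMMAS AND PROOFS =====

-- the characters A's loop body appends at index x
def gather1 (l : List Char) (x : Int) : List Char :=
  if x < (l.length : Int) then [PySem.List.pyGetD l x ' '] else []

def gather4 (a b c d : List Char) (x : Int) : List Char :=
  gather1 a x ++ gather1 b x ++ gather1 c x ++ gather1 d x

theorem quadZipStep_eq (a b c d s : List Char) (x : Int) :
    quadZipStep a b c d s x = s ++ gather4 a b c d x := by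
  unfold quadZipStep gather4 gather1
  split_ifs <;> simp

theorem merge_nil : quadZipMerge [] [] [] [] = [] := by
  simp [quadZipMerge]

theorem merge_unfold (a b c d : List Char) (h : ¬ (a = [] ∧ b = [] ∧ c = [] ∧ d = [])) :
    quadZipMerge a b c d
      = (a.head?.toList ++ b.head?.toList ++ c.head?.toList ++ d.head?.toList)
        ++ quadZipMerge a.tail b.tail c.tail d.tail := by
  conv_lhs => rw [quadZipMerge]
  rw [dif_neg h]

theorem gather1_nil (x : Int) (hx : 0 ≤ x) : gather1 [] x = [] := by
  unfold gather1
  rw [if_neg]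
  simp only [List.length_nil]
  omega

theorem gather1_zero (l : List Char) : gather1 l 0 = l.head?.toList := by
  cases l with
  | nil => simp [gather1]
  | cons x xs => simp [gather1, PySem.List.pyGetD_zero_cons]

theorem gather1_succ (l : List Char) (n : Nat) :
    gather1 l ((n : Int) + 1) = gather1 l.tail (n : Int) := by
  cases l with
  | nil =>
      simp only [List.tail_nil]
      rw [gather1_nil _ (by omega), gather1_nil _ (by omega)]
  | cons x xs =>
      unfold gather1
      have hc : ((n : Int) + 1 < ((x :: xs).length : Int)) ↔ ((n : Int) < (((x :: xs).tail).length : Int)) := by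
        simp only [List.length_cons, List.tail_cons]
        push_cast
        omega
      have hg : PySem.List.pyGetD (x :: xs) ((n : Int) + 1) ' ' = PySem.List.pyGetD ((x :: xs).tail) (n : Int) ' ' := by
        rw [show ((n : Int) + 1) = (((n + 1 : Nat) : Int)) by push_cast; ring,
            PySem.List.pyGetD_natCast, PySem.List.pyGetD_natCast]
        simp
      rw [hg]
      exact if_congr hc rfl rfl

theorem gather4_succ (a b c d : List Char) (n : Nat) :
    gather4 a b c d ((n : Int) + 1) = gather4 a.tail b.tail c.tail d.tail (n : Int) := by
  simp [gather4, gather1_succ]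

theorem head?_take_succ {α : Type} (l : List α) (k : Nat) : (l.take (k+1)).head? = l.head? := by
  cases l <;> simp

theorem tail_take_succ {α : Type} (l : List α) (k : Nat) : (l.take (k+1)).tail = l.tail.take k := by
  cases l <;> simp

theorem take_succ_eq_nil_iff {α : Type} (l : List α) (k : Nat) : l.take (k+1) = [] ↔ l = [] := by
  cases l <;> simp

-- taking one more column on each list appends exactly that column's characters
theorem merge_take_succ (n : Nat) : ∀ (a b c d : List Char),
    quadZipMerge (a.take (n+1)) (b.take (n+1)) (c.take (n+1)) (d.take (n+1))
      = quadZipMerge (a.take n) (b.take n) (c.take n) (d.take n) ++ gather4 a b c d (n : Int) := by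
  induction n with
  | zero =>
      intro a b c d
      rcases a with _ | ⟨x, a⟩ <;> rcases b with _ | ⟨y, b⟩ <;> rcases c with _ | ⟨z, c⟩ <;>
        rcases d with _ | ⟨u, d⟩ <;>
        simp [quadZipMerge, gather4, gather1_zero]
  | succ n ih =>
      intro a b c d
      by_cases hall : a = [] ∧ b = [] ∧ c = [] ∧ d = []
      · obtain ⟨ha, hb, hc, hd⟩ := hall
        subst ha; subst hb; subst hc; subst hd
        simp only [List.take_nil, merge_nil, List.nil_append, gather4]
        rw [gather1_nil _ (by omega)]
        simp
      · have hall' : ¬ (a.take (n+2) = [] ∧ b.take (n+2) = [] ∧ c.take (n+2) = [] ∧ d.take (n+2) = []) := by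
          simp only [take_succ_eq_nil_iff]; exact hall
        have hall'' : ¬ (a.take (n+1) = [] ∧ b.take (n+1) = [] ∧ c.take (n+1) = [] ∧ d.take (n+1) = []) := by
          simp only [take_succ_eq_nil_iff]; exact hall
        rw [merge_unfold _ _ _ _ hall', merge_unfold _ _ _ _ hall'']
        simp only [head?_take_succ, tail_take_succ]
        rw [ih a.tail b.tail c.tail d.tail]
        rw [show ((n + 1 : Nat) : Int) = (n : Int) + 1 by push_cast; ring, gather4_succ]
        simp [List.append_assoc]

-- A's loop up to n equals B's merge of the first n characters of each list
theorem foldl_range_eq (n : Nat) (a b c d : List Char) :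
    (PySem.List.pyRange 0 (n : Int) 1).foldl (quadZipStep a b c d) []
      = quadZipMerge (a.take n) (b.take n) (c.take n) (d.take n) := by
  induction n with
  | zero => simp [merge_nil]
  | succ n ih =>
      have hsplit : PySem.List.pyRange 0 ((n + 1 : Nat) : Int) 1
          = PySem.List.pyRange 0 (n : Int) 1 ++ [(n : Int)] := by
        rw [show ((n + 1 : Nat) : Int) = (n : Int) + 1 by push_cast; ring]
        exact PySem.List.pyRange_one_succ_right (by exact_mod_cast Nat.zero_le n)
      rw [hsplit, List.foldl_append, ih, List.foldl, List.foldl, quadZipStep_eq,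
          merge_take_succ]

-- ===== VERDICT (by name: the statement is the Claim_ definition above) =====
theorem quadZip_spec : Claim_equal_quadZip := by
  intro q w e r _
  unfold Spec_quadZip quadZip quadZip_alt
  rw [show (76 : Int) = ((76 : Nat) : Int) by norm_num]
  rw [foldl_range_eq 76, PySem.List.slice_to_natCast, PySem.List.slice_to_natCast,
      PySem.List.slice_to_natCast, PySem.List.slice_to_natCast]
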